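-- pv_equiv track=rewrite | github.com/BK1031/cs130b | pa1/checkerboard.py | solve_magic_checkerboard
-- ===== SOURCE A (Python) =====
-- def is_valid(board, i, j, value):
--     if any(board[i][col] == value for col in range(len(board[0]))):
--         return False
--
--     if any(board[row][j] == value for row in range(len(board))):
--         return False
--
--     neighbors = [(i-1, j-1), (i-1, j+1), (i+1, j-1), (i+1, j+1)]
--     for row, col in neighbors:
--         if 0 <= row < len(board) and 0 <= col < len(board[0]):
--             if board[row][col] != 0 and board[row][col] % 2 == value % 2:
--                 return False
--     return True
--
-- def recurse(board, i, j):
--     if i == len(board):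
--         return True
--     if j == len(board[0]):
--         return recurse(board, i + 1, 0)
--     if board[i][j] != 0:
--         return recurse(board, i, j + 1)
--     for value in range(1, 2001):
--         if is_valid(board, i, j, value):
--             board[i][j] = value
--             if recurse(board, i, j + 1):
--                 return True
--             board[i][j] = 0
--     return False
--
-- def solve_magic_checkerboard(n, m, board):
--     if n % 2 != 0 and m % 2 != 0:
--         return -1
--     if n % 2 != m % 2:
--         return -1
--     if not recurse(board, 0, 0):
--         return -1
--     return sum(sum(row) for row in board)
-- ===== SOURCE B (Python) =====
-- # B: same first-found backtracking solution, but decomposed differently: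
-- # the empty cells are collected once in row-major order and the search is a
-- # recursion over that list, instead of A's cell-by-cell grid recursion with
-- # interleaved skip/row-advance logic.  (Mutates `board` in place, like A.)
-- def solve_magic_checkerboard(n, m, board):
--     if n % 2 or m % 2:
--         return -1
--     width = len(board[0]) if board else 0
--
--     def ok(i, j, v):
--         if v in board[i]:
--             return False
--         if any(row[j] == v for row in board):
--             return False
--         for r in (i - 1, i + 1):
--             for c in (j - 1, j + 1):
--                 if 0 <= r < len(board) and 0 <= c < width:
--                     x = board[r][c]
--                     if x != 0 and x % 2 == v % 2:
--                         return False
--         return True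
--
--     cells = [(i, j) for i in range(len(board)) for j in range(width)
--              if board[i][j] == 0]
--
--     def fill(k):
--         if k == len(cells):
--             return True
--         i, j = cells[k]
--         for v in range(1, 2001):
--             if ok(i, j, v):
--                 board[i][j] = v
--                 if fill(k + 1):
--                     return True
--                 board[i][j] = 0
--         return False
--
--     if not fill(0):
--         return -1
--     return sum(x for row in board for x in row)
-- ===== Notes on version B (the rewrite author's own statement) =====
-- stated objective: alternative
-- what changed: A's grid recursion over (i,j) with interleaved end-of-row/row-advance/skip-filled branches is replaced by collecting the empty cells once in row-major order and backtracking by structural recursion over that cell list (with a restructured validity check using row membership); the parity guard is collapsed to a single test. Pre_ requires a rectangular board only when both n and m are even (otherwise the parity guards answer -1 without touching the board); on ragged boards A raises on short rows and its handling of longer rows is an accident of taking the width from row 0.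
-- outside the precondition, e.g. on solve_magic_checkerboard(2, 2, [[9, 9], [0, 9, 2]]): A returns 31, B returns 33; on solve_magic_checkerboard(2, 2, [[1, 2], [0]]): A raises IndexError, B raises IndexError
import Mathlib
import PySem

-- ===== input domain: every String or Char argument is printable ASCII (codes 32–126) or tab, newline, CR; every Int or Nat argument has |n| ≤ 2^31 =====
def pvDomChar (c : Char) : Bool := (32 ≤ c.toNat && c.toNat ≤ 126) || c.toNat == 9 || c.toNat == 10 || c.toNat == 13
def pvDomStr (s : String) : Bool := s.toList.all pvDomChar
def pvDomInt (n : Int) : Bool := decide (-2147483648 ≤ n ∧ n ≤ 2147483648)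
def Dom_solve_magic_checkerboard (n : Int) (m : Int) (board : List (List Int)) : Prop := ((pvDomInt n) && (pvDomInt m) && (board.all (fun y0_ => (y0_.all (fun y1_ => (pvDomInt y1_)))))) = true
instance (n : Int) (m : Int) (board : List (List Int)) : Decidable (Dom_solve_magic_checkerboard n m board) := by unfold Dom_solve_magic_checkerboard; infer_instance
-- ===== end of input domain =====

-- B replaces A's (i,j) grid recursion (with interleaved row-advance / skip-filled
-- branches) by one backtracking recursion over the precomputed row-major list of
-- empty cells; same first-found solution and sum.  Both Pythons mutate `board` in
-- place; the equivalence proved here is about the return value.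

-- shared board helpers: len(board[0]) (0 for []), board[i][j] read, board[i][j] = v write
def pvW (b : List (List Int)) : Nat := (b.headD []).length
def pvGet (b : List (List Int)) (i j : Nat) : Int := (b.getD i []).getD j 0
def pvSet (b : List (List Int)) (i j : Nat) (v : Int) : List (List Int) :=
  b.set i ((b.getD i []).set j v)
-- the body of Python's bounds-guarded diagonal-neighbour test (shared: A runs it over a
-- flat 4-list of pairs, B over nested r/c pairs); Int `%` with divisor 2 matches Python's `%`
def pvBadNbr (b : List (List Int)) (v : Int) (rc : Int × Int) : Bool :=
  decide (0 ≤ rc.1) && decide (rc.1 < (b.length : Int)) &&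
  decide (0 ≤ rc.2) && decide (rc.2 < ((pvW b : Nat) : Int)) &&
  (pvGet b rc.1.toNat rc.2.toNat != 0) && (pvGet b rc.1.toNat rc.2.toNat % 2 == v % 2)

-- termination helpers for the ports (cited by decreasing_by)
def pvPos (b : List (List Int)) (i j : Nat) : Nat :=
  (b.length - i) * (pvW b + 2) + (pvW b + 1 - j)

theorem pvLen_set (b : List (List Int)) (i j : Nat) (v : Int) :
    (pvSet b i j v).length = b.length := by
  simp [pvSet]

theorem pvW_set (b : List (List Int)) (i j : Nat) (v : Int) :
    pvW (pvSet b i j v) = pvW b := by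
  cases b with
  | nil => simp [pvSet, pvW]
  | cons r t =>
    cases i with
    | zero => simp [pvSet, pvW]
    | succ k => simp [pvSet, pvW, List.set_cons_succ]

theorem pvPos_set (b : List (List Int)) (i j : Nat) (v : Int) (i' j' : Nat) :
    pvPos (pvSet b i j v) i' j' = pvPos b i' j' := by
  simp [pvPos, pvLen_set, pvW_set]

theorem pvPos_next_row (b : List (List Int)) (i j : Nat) (h : i < b.length) :
    pvPos b (i + 1) 0 < pvPos b i j := by
  unfold pvPos
  have e1 : b.length - i = (b.length - (i + 1)) + 1 := by omega
  rw [e1]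
  have e2 : ((b.length - (i + 1)) + 1) * (pvW b + 2)
      = (b.length - (i + 1)) * (pvW b + 2) + (pvW b + 2) := by ring
  omega

theorem pvPos_next_col (b : List (List Int)) (i j : Nat) (h : j < pvW b) :
    pvPos b i (j + 1) + 1 ≤ pvPos b i j := by
  unfold pvPos; omega

-- ===== PORT A =====
-- is_valid: row scan over range(len(board[0])), column scan over range(len(board)),
-- then the four diagonal neighbours in A's order
def is_valid (b : List (List Int)) (i j : Nat) (v : Int) : Bool :=
  if (List.range (pvW b)).any (fun c => pvGet b i c == v) then false
  else if (List.range b.length).any (fun r => pvGet b r j == v) then false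
  else !(([((i:Int)-1, (j:Int)-1), ((i:Int)-1, (j:Int)+1),
          ((i:Int)+1, (j:Int)-1), ((i:Int)+1, (j:Int)+1)]).any (pvBadNbr b v))

-- recurse: the board is threaded functionally (Python mutates it); the Bool is
-- Python's return value, the List the board after the call.  The ≤ guards read
-- exactly as Python's == tests on every reachable index (i ≤ len, j ≤ width) and
-- make termination provable; hi/hj are proof arguments only.
set_option maxRecDepth 4096 in
mutual
def recurseA (b : List (List Int)) (i j : Nat) : Bool × List (List Int) :=
  if _h1 : b.length ≤ i then (true, b)
  else if _h2 : pvW b ≤ j then recurseA b (i + 1) 0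
  else if pvGet b i j != 0 then recurseA b i (j + 1)
  else tryA b i j (by omega) (by omega) (PySem.List.pyRange 1 2001 1)
termination_by 3000 * pvPos b i j + 2002
decreasing_by
  · have := pvPos_next_row b i j (by omega); omega
  · have := pvPos_next_col b i j (by omega); omega
  · have h : (PySem.List.pyRange 1 2001 1).length < 2002 := by
      simp [PySem.List.pyRange]
    omega

def tryA (b : List (List Int)) (i j : Nat) (hi : i < b.length) (hj : j < pvW b)
    (vals : List Int) : Bool × List (List Int) :=
  match vals with
  | [] => (false, b)
  | v :: rest =>
    if is_valid b i j v then
      let r := recurseA (pvSet b i j v) i (j + 1)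
      if r.1 then r else tryA b i j hi hj rest
    else tryA b i j hi hj rest
termination_by 3000 * pvPos b i j + vals.length
decreasing_by
  · have h1 := pvPos_next_col b i j hj
    have h2 := pvPos_set b i j v i (j + 1)
    simp only [List.length_cons]; omega
  · simp only [List.length_cons]; omega
  · simp only [List.length_cons]; omega
end

def solve_magic_checkerboard (n : Int) (m : Int) (board : List (List Int)) : Int :=
  if PySem.Int.mod n 2 != 0 && PySem.Int.mod m 2 != 0 then -1
  else if PySem.Int.mod n 2 != PySem.Int.mod m 2 then -1
  else
    let r := recurseA board 0 0
    if !r.1 then -1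
    else r.2.foldl (fun acc row => acc + row.foldl (fun a x => a + x) 0) 0

-- ===== PORT B =====
-- ok: `v in board[i]` membership, column generator over the rows themselves,
-- nested loops r ∈ (i-1, i+1), c ∈ (j-1, j+1) for the diagonal parity test
def ok_alt (b : List (List Int)) (i j : Nat) (v : Int) : Bool :=
  if (b.getD i []).any (fun x => x == v) then false
  else if b.any (fun row => row.getD j 0 == v) then false
  else ([(i:Int)-1, (i:Int)+1]).all (fun r =>
         ([(j:Int)-1, (j:Int)+1]).all (fun c => !(pvBadNbr b v (r, c))))

-- the row-major list comprehension of empty cells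
def cells_alt (b : List (List Int)) : List (Nat × Nat) :=
  (List.range b.length).flatMap (fun i =>
    ((List.range (pvW b)).filter (fun j => pvGet b i j == 0)).map (fun j => (i, j)))

-- fill: structural backtracking recursion over the empty-cell list
set_option maxRecDepth 4096 in
mutual
def fillB (b : List (List Int)) (cells : List (Nat × Nat)) : Bool × List (List Int) :=
  match cells with
  | [] => (true, b)
  | (i, j) :: cs => tryB b i j cs (PySem.List.pyRange 1 2001 1)
termination_by (cells.length, 2001)
decreasing_by
  · apply Prod.Lex.right
    have h : (PySem.List.pyRange 1 2001 1).length < 2001 := by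
      simp [PySem.List.pyRange]
    omega

def tryB (b : List (List Int)) (i j : Nat) (cs : List (Nat × Nat))
    (vals : List Int) : Bool × List (List Int) :=
  match vals with
  | [] => (false, b)
  | v :: rest =>
    if ok_alt b i j v then
      let r := fillB (pvSet b i j v) cs
      if r.1 then r else tryB b i j cs rest
    else tryB b i j cs rest
termination_by (cs.length + 1, vals.length)
decreasing_by
  · apply Prod.Lex.left; omega
  · apply Prod.Lex.right; simp only [List.length_cons]; omega
  · apply Prod.Lex.right; simp only [List.length_cons]; omega
end

def solve_magic_checkerboard_alt (n : Int) (m : Int) (board : List (List Int)) : Int :=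
  if PySem.Int.mod n 2 != 0 || PySem.Int.mod m 2 != 0 then -1
  else
    let r := fillB board (cells_alt board)
    if !r.1 then -1
    else (r.2.flatMap id).foldl (fun a x => a + x) 0

-- ===== PRECONDITION & SPEC =====
-- Pre_ requires the board to be rectangular (every row as long as row 0) only when
-- both n and m are even, i.e. only when the parity guards let the search touch the
-- board at all: on ragged boards the search of A raises IndexError on any row
-- shorter than row 0 it reaches, and its treatment of longer rows (constraints read
-- only the first-row-width prefix, the sum reads everything) is an accident of
-- taking the width from row 0 — no behaviour there is specified.
def Pre_solve_magic_checkerboard (n : Int) (m : Int) (board : List (List Int)) : Prop :=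
  (PySem.Int.mod n 2 = 0 ∧ PySem.Int.mod m 2 = 0) →
    ∀ row ∈ board, row.length = (board.headD []).length
instance (n : Int) (m : Int) (board : List (List Int)) : Decidable (Pre_solve_magic_checkerboard n m board) := by unfold Pre_solve_magic_checkerboard; infer_instance
def pvWitness_solve_magic_checkerboard : Int × Int × List (List Int) := (0, 0, [[1, 0], [0, 2]])
def Spec_solve_magic_checkerboard (n : Int) (m : Int) (board : List (List Int)) (out : Int) : Prop := out = solve_magic_checkerboard_alt n m board
instance (n : Int) (m : Int) (board : List (List Int)) (out : Int) : Decidable (Spec_solve_magic_checkerboard n m board out) := by unfold Spec_solve_magic_checkerboard; infer_instance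

-- ===== CLAIM (what is proved, stated in full; the proofs are below) =====
def Claim_equal_solve_magic_checkerboard : Prop := ∀ (n : Int) (m : Int) (board : List (List Int)), Dom_solve_magic_checkerboard n m board → Pre_solve_magic_checkerboard n m board → Spec_solve_magic_checkerboard n m board (solve_magic_checkerboard n m board)

-- ===== LEMMAS AND PROOFS =====

-- rectangularity invariant maintained by the search
def pvRect (b : List (List Int)) : Prop := ∀ row ∈ b, row.length = pvW b

theorem pvRect_set (b : List (List Int)) (i j : Nat) (v : Int) (hb : pvRect b) :
    pvRect (pvSet b i j v) := by
  intro row hrow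
  rw [pvW_set]
  by_cases hi : i < b.length
  · rcases List.mem_or_eq_of_mem_set hrow with h | h
    · exact hb row h
    · subst h
      rw [List.length_set]
      exact hb _ (by rw [List.getD_eq_getElem _ _ hi]; exact List.getElem_mem hi)
  · rw [pvSet, List.set_eq_of_length_le (by omega)] at hrow
    exact hb row hrow

theorem pvGet_set_ne (b : List (List Int)) (i j : Nat) (v : Int) (i' j' : Nat)
    (h : i' ≠ i ∨ j' ≠ j) : pvGet (pvSet b i j v) i' j' = pvGet b i' j' := by
  by_cases hii : i' = i
  · subst hii
    have hj : j' ≠ j := h.resolve_left (by simp)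
    by_cases hi : i' < b.length
    · simp only [pvGet, pvSet, List.getD]
      rw [List.getElem?_set_self hi, Option.getD_some, List.getElem?_set_ne (Ne.symm hj)]
    · rw [pvSet, List.set_eq_of_length_le (by omega)]
  · simp only [pvGet, pvSet, List.getD]
    rw [List.getElem?_set_ne (Ne.symm hii)]

-- any over indices = any over elements
theorem pvAny_range_getD {α : Type} (l : List α) (p : α → Bool) (d : α) :
    (List.range l.length).any (fun k => p (l.getD k d)) = l.any p := by
  rw [Bool.eq_iff_iff, List.any_eq_true, List.any_eq_true]
  constructor
  · rintro ⟨k, hk, hp⟩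
    rw [List.mem_range] at hk
    exact ⟨l[k], List.getElem_mem hk, by rwa [List.getD_eq_getElem _ _ hk] at hp⟩
  · rintro ⟨x, hx, hp⟩
    obtain ⟨k, hk, rfl⟩ := List.mem_iff_getElem.mp hx
    exact ⟨k, List.mem_range.mpr hk, by rwa [List.getD_eq_getElem _ _ hk]⟩

-- A's is_valid and B's ok agree on rectangular boards at in-range cells
theorem pvValid_eq (b : List (List Int)) (i j : Nat) (v : Int)
    (hb : pvRect b) (hi : i < b.length) :
    is_valid b i j v = ok_alt b i j v := by
  have hrow : (b.getD i []).length = pvW b :=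
    hb _ (by rw [List.getD_eq_getElem _ _ hi]; exact List.getElem_mem hi)
  rw [is_valid, ok_alt]
  have h1 : (List.range (pvW b)).any (fun c => pvGet b i c == v)
      = (b.getD i []).any (fun x => x == v) := by
    rw [← hrow, ← pvAny_range_getD (b.getD i []) (fun x => x == v) 0]
    rfl
  have h2 : (List.range b.length).any (fun r => pvGet b r j == v)
      = b.any (fun row => row.getD j 0 == v) := by
    rw [← pvAny_range_getD b (fun row => row.getD j 0 == v) []]
    rfl
  rw [h1, h2]
  rcases (b.getD i []).any (fun x => x == v) with _ | _ <;>
    rcases b.any (fun row => row.getD j 0 == v) with _ | _ <;>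
      simp [List.any, List.all, Bool.not_or, Bool.and_assoc]

-- the empty cells at positions ≥ (i,j) in row-major order (proof device)
def cellsFrom (b : List (List Int)) (i j : Nat) : List (Nat × Nat) :=
  if b.length ≤ i then []
  else if pvW b ≤ j then cellsFrom b (i + 1) 0
  else if pvGet b i j != 0 then cellsFrom b i (j + 1)
  else (i, j) :: cellsFrom b i (j + 1)
termination_by pvPos b i j
decreasing_by
  · exact pvPos_next_row b i j (by omega)
  · have := pvPos_next_col b i j (by omega); omega
  · have := pvPos_next_col b i j (by omega); omega

-- writing a cell strictly before (i',j') does not change the cells seen from (i',j')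
theorem cellsFrom_set (b : List (List Int)) (i j : Nat) (v : Int) (i' j' : Nat)
    (h : i < i' ∨ (i = i' ∧ j < j')) :
    cellsFrom (pvSet b i j v) i' j' = cellsFrom b i' j' := by
  induction i', j' using cellsFrom.induct b with
  | case1 i' j' h1 =>
    conv_lhs => rw [cellsFrom.eq_def]
    conv_rhs => rw [cellsFrom.eq_def]
    simp only [pvLen_set, pvW_set]
    rw [if_pos h1, if_pos h1]
  | case2 i' j' h1 h2 ih =>
    conv_lhs => rw [cellsFrom.eq_def]
    conv_rhs => rw [cellsFrom.eq_def]
    simp only [pvLen_set, pvW_set]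
    rw [if_neg h1, if_neg h1, if_pos h2, if_pos h2]
    exact ih (by omega)
  | case3 i' j' h1 h2 h3 ih =>
    have hne : i' ≠ i ∨ j' ≠ j := by omega
    conv_lhs => rw [cellsFrom.eq_def]
    conv_rhs => rw [cellsFrom.eq_def]
    simp only [pvLen_set, pvW_set, pvGet_set_ne b i j v i' j' hne]
    rw [if_neg h1, if_neg h1, if_neg h2, if_neg h2, if_pos h3, if_pos h3]
    exact ih (by omega)
  | case4 i' j' h1 h2 h3 ih =>
    have hne : i' ≠ i ∨ j' ≠ j := by omega
    conv_lhs => rw [cellsFrom.eq_def]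
    conv_rhs => rw [cellsFrom.eq_def]
    simp only [pvLen_set, pvW_set, pvGet_set_ne b i j v i' j' hne]
    rw [if_neg h1, if_neg h1, if_neg h2, if_neg h2, if_neg h3, if_neg h3]
    rw [ih (by omega)]

-- main invariant: A's grid recursion = B's recursion over the remaining empty cells
theorem pvMain : ∀ (b : List (List Int)) (i j : Nat), pvRect b →
    recurseA b i j = fillB b (cellsFrom b i j) := by
  refine (recurseA.mutual_induct
    (motive1 := fun b i j => pvRect b → recurseA b i j = fillB b (cellsFrom b i j))
    (motive2 := fun b i j hi hj vals => pvRect b →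
      tryA b i j hi hj vals = tryB b i j (cellsFrom b i (j + 1)) vals)
    ?_ ?_ ?_ ?_ ?_ ?_ ?_ ?_).1
  · intro b i j h1 _
    rw [recurseA, dif_pos h1, cellsFrom, if_pos h1, fillB]
  · intro b i j h1 h2 ih hrect
    rw [recurseA, dif_neg h1, dif_pos h2, cellsFrom, if_neg h1, if_pos h2]
    exact ih hrect
  · intro b i j h1 h2 h3 ih hrect
    rw [recurseA, dif_neg h1, dif_neg h2, if_pos h3, cellsFrom, if_neg h1, if_neg h2, if_pos h3]
    exact ih hrect
  · intro b i j h1 h2 h3 ih hrect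
    rw [recurseA, dif_neg h1, dif_neg h2, if_neg h3, cellsFrom, if_neg h1, if_neg h2, if_neg h3,
      fillB]
    exact ih hrect
  · intro b i j hi hj hrect
    rw [tryA, tryB]
  · intro b i j hi hj v rest hvalid r hr1 ih1 hrect
    have hbs := pvRect_set b i j v hrect
    have e1 : fillB (pvSet b i j v) (cellsFrom b i (j + 1))
        = recurseA (pvSet b i j v) i (j + 1) := by
      rw [ih1 hbs, cellsFrom_set b i j v i (j + 1) (Or.inr ⟨rfl, by omega⟩)]
    have hok : ok_alt b i j v = true := by rw [← pvValid_eq b i j v hrect hi]; exact hvalid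
    rw [tryA, if_pos hvalid, tryB, if_pos hok, e1]
    have hr1' : (recurseA (pvSet b i j v) i (j + 1)).1 = true := hr1
    simp only []
    rw [if_pos hr1', if_pos hr1']
  · intro b i j hi hj v rest hvalid r hr1 ih1 ih2 hrect
    have hbs := pvRect_set b i j v hrect
    have e1 : fillB (pvSet b i j v) (cellsFrom b i (j + 1))
        = recurseA (pvSet b i j v) i (j + 1) := by
      rw [ih1 hbs, cellsFrom_set b i j v i (j + 1) (Or.inr ⟨rfl, by omega⟩)]
    have hok : ok_alt b i j v = true := by rw [← pvValid_eq b i j v hrect hi]; exact hvalid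
    rw [tryA, if_pos hvalid, tryB, if_pos hok, e1]
    have hr1' : ¬ (recurseA (pvSet b i j v) i (j + 1)).1 = true := hr1
    simp only []
    rw [if_neg hr1', if_neg hr1']
    exact ih2 hrect
  · intro b i j hi hj v rest hvalid ih2 hrect
    have hok : ok_alt b i j v = false := by
      rw [← pvValid_eq b i j v hrect hi]; simpa using hvalid
    rw [tryA, if_neg hvalid, tryB, if_neg (by simp [hok])]
    exact ih2 hrect

-- B's comprehension computes cellsFrom from the origin
theorem cellsFrom_row (b : List (List Int)) (i : Nat) (hi : i < b.length) :
    ∀ (k j : Nat), j + k = pvW b →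
    cellsFrom b i j =
      (((List.range' j k).filter (fun c => pvGet b i c == 0)).map (fun c => (i, c)))
        ++ cellsFrom b (i + 1) 0 := by
  intro k
  induction k with
  | zero =>
    intro j hj
    rw [cellsFrom, if_neg (by omega), if_pos (by omega)]
    simp
  | succ k ih =>
    intro j hj
    rw [cellsFrom, if_neg (by omega), if_neg (by omega), List.range'_succ]
    by_cases hz : (pvGet b i j != 0) = true
    · rw [if_pos hz, ih (j + 1) (by omega)]
      have : (pvGet b i j == 0) = false := by simpa using hz
      simp [this]
    · rw [if_neg hz, ih (j + 1) (by omega)]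
      have : (pvGet b i j == 0) = true := by simpa using hz
      simp [this]

theorem cellsFrom_col0 (b : List (List Int)) :
    ∀ (k i : Nat), i + k = b.length →
    cellsFrom b i 0 = (List.range' i k).flatMap (fun r =>
      ((List.range (pvW b)).filter (fun c => pvGet b r c == 0)).map (fun c => (r, c))) := by
  intro k
  induction k with
  | zero =>
    intro i hi
    rw [cellsFrom, if_pos (by omega)]
    simp
  | succ k ih =>
    intro i hi
    rw [cellsFrom_row b i (by omega) (pvW b) 0 (by omega), List.range'_succ]
    rw [List.flatMap_cons, ih (i + 1) (by omega)]
    rw [List.range_eq_range']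

theorem cells_alt_eq (b : List (List Int)) : cells_alt b = cellsFrom b 0 0 := by
  rw [cells_alt, cellsFrom_col0 b b.length 0 (by omega)]
  simp [List.range_eq_range']

-- the two sums agree
theorem pvSum_eq (l : List (List Int)) :
    l.foldl (fun acc row => acc + row.foldl (fun a x => a + x) 0) 0
      = (l.flatMap id).foldl (fun a x => a + x) 0 := by
  have h1 : ∀ (xs : List Int), xs.foldl (fun a x => a + x) 0 = xs.sum := by
    intro xs; simpa using PySem.List.foldl_add xs (fun x => x) 0
  calc l.foldl (fun acc row => acc + row.foldl (fun a x => a + x) 0) 0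
      = l.foldl (fun acc row => acc + row.sum) 0 := by simp only [h1]
    _ = (l.map List.sum).sum := by simpa using PySem.List.foldl_add l List.sum 0
    _ = l.flatten.sum := List.sum_flatten.symm
    _ = (l.flatMap id).foldl (fun a x => a + x) 0 := by rw [List.flatMap_id, h1]

-- ===== VERDICT (by name: the statement is the Claim_ definition above) =====
theorem solve_magic_checkerboard_spec : Claim_equal_solve_magic_checkerboard := by
  intro n m board _ hpre
  unfold Spec_solve_magic_checkerboard
  rw [solve_magic_checkerboard, solve_magic_checkerboard_alt]
  have hn0 := PySem.Int.mod_nonneg n (b := 2) (by norm_num)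
  have hn1 := PySem.Int.mod_lt n (b := 2) (by norm_num)
  have hm0 := PySem.Int.mod_nonneg m (b := 2) (by norm_num)
  have hm1 := PySem.Int.mod_lt m (b := 2) (by norm_num)
  by_cases hA : (PySem.Int.mod n 2 != 0 && PySem.Int.mod m 2 != 0) = true
  · rw [if_pos hA, if_pos (show (PySem.Int.mod n 2 != 0 || PySem.Int.mod m 2 != 0) = true by
      simp only [Bool.and_eq_true] at hA
      simp only [Bool.or_eq_true]
      exact Or.inl hA.1)]
  · rw [if_neg hA]
    simp only [Bool.and_eq_true, bne_iff_ne, ne_eq, not_and, not_not] at hA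
    by_cases hB : (PySem.Int.mod n 2 != PySem.Int.mod m 2) = true
    · rw [if_pos hB, if_pos (show (PySem.Int.mod n 2 != 0 || PySem.Int.mod m 2 != 0) = true by
        simp only [bne_iff_ne, ne_eq] at hB
        simp only [Bool.or_eq_true, bne_iff_ne, ne_eq]
        omega)]
    · rw [if_neg hB]
      simp only [bne_iff_ne, ne_eq, not_not] at hB
      rw [if_neg (show ¬ (PySem.Int.mod n 2 != 0 || PySem.Int.mod m 2 != 0) = true by
        simp only [Bool.or_eq_true, bne_iff_ne, ne_eq]
        omega)]
      have hboth : PySem.Int.mod n 2 = 0 ∧ PySem.Int.mod m 2 = 0 := by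
        by_cases ha : PySem.Int.mod n 2 = 0
        · exact ⟨ha, by omega⟩
        · have hb := hA ha
          exact ⟨by omega, hb⟩
      have hrect : pvRect board := hpre hboth
      rw [pvMain board 0 0 hrect, cells_alt_eq board]
      simp only [pvSum_eq]
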